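-- pv_equiv track=rewrite | github.com/danmedani/euler | 345/hungarian.py | get_max_cols
-- ===== SOURCE A (Python) =====
-- def get_max_cols(mat, row_covers, col_covers):
-- 	max_num_zeros = 0
-- 	max_col = -1
-- 	for col_index in range(len(mat)):
-- 		if col_index not in col_covers:
-- 			count_zeros_in_this_col = 0
-- 			for row_index in range(len(mat)):
-- 				if row_index not in row_covers and mat[row_index][col_index] == 0:
-- 					count_zeros_in_this_col += 1
--
-- 			if count_zeros_in_this_col > max_num_zeros:
-- 				max_num_zeros = count_zeros_in_this_col
-- 				max_col = col_index
--
-- 	return max_col, max_num_zeros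
-- ===== SOURCE B (Python) =====
-- def get_max_cols(mat, row_covers, col_covers):
-- 	n = len(mat)
-- 	rcs = set(row_covers)
-- 	ccs = set(col_covers)
-- 	counts = [0] * n
-- 	for row_index in range(n):
-- 		if row_index not in rcs:
-- 			row = mat[row_index]
-- 			for col_index in range(n):
-- 				if col_index not in ccs and row[col_index] == 0:
-- 					counts[col_index] += 1
-- 	max_num_zeros = 0
-- 	max_col = -1
-- 	for col_index in range(n):
-- 		if counts[col_index] > max_num_zeros:
-- 			max_num_zeros = counts[col_index]
-- 			max_col = col_index
-- 	return max_col, max_num_zeros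
-- ===== Notes on version B (the rewrite author's own statement) =====
-- stated objective: alternative
-- what changed: B swaps the loop nest: one row-major pass tallies zeros per uncovered column into a counts table (with cover lists turned into sets), then a separate argmax pass over the table replaces A's per-column rescans.
import Mathlib
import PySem

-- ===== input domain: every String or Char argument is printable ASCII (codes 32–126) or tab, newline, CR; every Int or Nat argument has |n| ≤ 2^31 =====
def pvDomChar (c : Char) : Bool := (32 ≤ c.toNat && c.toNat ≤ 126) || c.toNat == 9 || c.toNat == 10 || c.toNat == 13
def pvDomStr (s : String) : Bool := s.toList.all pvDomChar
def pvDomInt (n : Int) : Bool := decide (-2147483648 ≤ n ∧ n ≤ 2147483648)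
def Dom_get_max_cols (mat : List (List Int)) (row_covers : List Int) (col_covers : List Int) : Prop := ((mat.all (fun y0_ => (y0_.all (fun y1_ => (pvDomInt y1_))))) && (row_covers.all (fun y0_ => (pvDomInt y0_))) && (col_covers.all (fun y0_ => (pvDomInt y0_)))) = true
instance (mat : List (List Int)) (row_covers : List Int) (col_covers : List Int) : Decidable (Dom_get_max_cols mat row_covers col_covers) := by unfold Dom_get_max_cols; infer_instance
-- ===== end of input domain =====

-- B swaps the loop nest: one row-major tally pass per column (covers held as sets), then a separate argmax pass; alternative decomposition, not claimed faster.

-- ===== PORT A =====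
-- A-side helper: the inner 'count zeros in this column' loop of A.
def aColCount (mat : List (List Int)) (row_covers : List Int) (n c : Int) : Int :=
  (PySem.List.pyRange 0 n 1).foldl
    (fun acc r =>
      if (¬ r ∈ row_covers) ∧ PySem.List.pyGetD (PySem.List.pyGetD mat r []) c 1 = 0
      then acc + 1 else acc) 0

-- A-side helper: one iteration of A's outer column loop, state = (max_num_zeros, max_col).
def aStep (mat : List (List Int)) (row_covers : List Int) (col_covers : List Int) (n : Int)
    (st : Int × Int) (c : Int) : Int × Int :=
  if c ∈ col_covers then st
  else
    let cnt := aColCount mat row_covers n c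
    if cnt > st.1 then (cnt, c) else st

def get_max_cols (mat : List (List Int)) (row_covers : List Int) (col_covers : List Int) : Int × Int :=
  let n : Int := (mat.length : Int)
  let res := (PySem.List.pyRange 0 n 1).foldl (aStep mat row_covers col_covers n) (0, -1)
  (res.2, res.1)

-- ===== PORT B =====
-- B-side helper: the inner column loop of B's tally pass over one uncovered row.
def bBump (ccs : PySem.Set Int) (row : List Int) (n : Int) (counts : List Int) : List Int :=
  (PySem.List.pyRange 0 n 1).foldl
    (fun cs c =>
      if (¬ c ∈ ccs) ∧ PySem.List.pyGetD row c 1 = 0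
      then PySem.List.pySetD cs c (PySem.List.pyGetD cs c 0 + 1) else cs) counts

-- B-side helper: the row-major tally pass building the per-column zero counts.
def bCounts (mat : List (List Int)) (rcs ccs : PySem.Set Int) (n : Int) : List Int :=
  (PySem.List.pyRange 0 n 1).foldl
    (fun cs r => if r ∈ rcs then cs else bBump ccs (PySem.List.pyGetD mat r []) n cs)
    (List.replicate mat.length 0)

def get_max_cols_alt (mat : List (List Int)) (row_covers : List Int) (col_covers : List Int) : Int × Int :=
  let n : Int := (mat.length : Int)
  let rcs := PySem.Set.ofList row_covers
  let ccs := PySem.Set.ofList col_covers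
  let counts := bCounts mat rcs ccs n
  let res := (PySem.List.pyRange 0 n 1).foldl
    (fun st c =>
      if PySem.List.pyGetD counts c 0 > st.1 then (PySem.List.pyGetD counts c 0, c) else st)
    (0, -1)
  (res.2, res.1)

-- ===== PRECONDITION & SPEC =====
-- Pre_ excludes exactly the ragged matrices on which Python A raises IndexError: some
-- uncovered row shorter than the highest uncovered column index < len(mat).
def Pre_get_max_cols (mat : List (List Int)) (row_covers : List Int) (col_covers : List Int) : Prop :=
  ∀ r : Nat, r < mat.length → ¬ ((r : Int) ∈ row_covers) →
    ∀ c : Nat, c < mat.length → ¬ ((c : Int) ∈ col_covers) → c < (mat.getD r []).length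
instance (mat : List (List Int)) (row_covers : List Int) (col_covers : List Int) : Decidable (Pre_get_max_cols mat row_covers col_covers) := by unfold Pre_get_max_cols; infer_instance
def pvWitness_get_max_cols : List (List Int) × List Int × List Int := ([[0, 1], [1, 0]], [], [])

def Spec_get_max_cols (mat : List (List Int)) (row_covers : List Int) (col_covers : List Int) (out : Int × Int) : Prop := out = get_max_cols_alt mat row_covers col_covers
instance (mat : List (List Int)) (row_covers : List Int) (col_covers : List Int) (out : Int × Int) : Decidable (Spec_get_max_cols mat row_covers col_covers out) := by unfold Spec_get_max_cols; infer_instance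

-- ===== CLAIM (what is proved, stated in full; the proofs are below) =====
def Claim_equal_get_max_cols : Prop := ∀ (mat : List (List Int)) (row_covers : List Int) (col_covers : List Int), Dom_get_max_cols mat row_covers col_covers → Pre_get_max_cols mat row_covers col_covers → Spec_get_max_cols mat row_covers col_covers (get_max_cols mat row_covers col_covers)

-- ===== LEMMAS AND PROOFS =====

-- length preservation of a fold whose step preserves length
theorem pv_foldl_len {β : Type} (f : List Int → β → List Int)
    (h : ∀ cs b, (f cs b).length = cs.length) :
    ∀ (L : List β) (cs : List Int), (L.foldl f cs).length = cs.length := by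
  intro L
  induction L with
  | nil => intro cs; rfl
  | cons b L ih => intro cs; simp only [List.foldl_cons]; rw [ih, h]

theorem pv_bBump_len (ccs row : List Int) (n : Int) (cs : List Int) :
    (bBump ccs row n cs).length = cs.length := by
  unfold bBump
  apply pv_foldl_len
  intro cs c
  split
  · simp [PySem.List.length_pySetD]
  · rfl

-- pointwise characterisation of B's inner tally fold over pyRange a b 1
theorem pv_bump_get (ccs row : List Int) (a b : Int) (cs : List Int) (k : Int)
    (ha : 0 ≤ a) (hb : b ≤ (cs.length : Int)) (hk0 : 0 ≤ k) (hk : k < (cs.length : Int)) :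
    PySem.List.pyGetD
      ((PySem.List.pyRange a b 1).foldl
        (fun cs c =>
          if (¬ c ∈ ccs) ∧ PySem.List.pyGetD row c 1 = 0
          then PySem.List.pySetD cs c (PySem.List.pyGetD cs c 0 + 1) else cs) cs) k 0
    = PySem.List.pyGetD cs k 0 +
      (if a ≤ k ∧ k < b ∧ ¬ k ∈ ccs ∧ PySem.List.pyGetD row k 1 = 0 then 1 else 0) := by
  induction hm : (b - a).toNat generalizing a cs with
  | zero =>
    have hba : b ≤ a := by omega
    rw [PySem.List.pyRange_one_eq_nil hba]
    simp only [List.foldl_nil]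
    rw [if_neg (by omega)]
    · ring
  | succ m ih =>
    have hab : a < b := by omega
    rw [PySem.List.pyRange_one_cons hab, List.foldl_cons]
    set cs' := (if (¬ a ∈ ccs) ∧ PySem.List.pyGetD row a 1 = 0
          then PySem.List.pySetD cs a (PySem.List.pyGetD cs a 0 + 1) else cs) with hcs'
    have hlen' : cs'.length = cs.length := by
      rw [hcs']; split
      · simp [PySem.List.length_pySetD]
      · rfl
    rw [ih (a + 1) cs' (by omega) (by rw [hlen']; omega) (by rw [hlen']; omega) (by omega)]
    have hset : ∀ v : Int, PySem.List.pyGetD (PySem.List.pySetD cs a v) k 0 =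
        if k = a then v else PySem.List.pyGetD cs k 0 := by
      intro v
      rw [PySem.List.pySetD_of_nonneg cs v ha,
        PySem.List.pyGetD_eq_getElem _ 0 hk0 (by simpa using hk),
        PySem.List.pyGetD_eq_getElem cs 0 hk0 hk]
      rw [List.getElem_set]
      split_ifs with h1 h2 h3
      · rfl
      · omega
      · omega
      · rfl
    by_cases hka : k = a
    · subst hka
      rw [if_neg (by omega)]
      by_cases hcond : (¬ k ∈ ccs) ∧ PySem.List.pyGetD row k 1 = 0
      · rw [hcs', if_pos hcond, hset, if_pos rfl, if_pos ⟨le_refl k, hab, hcond.1, hcond.2⟩]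
        ring
      · rw [hcs', if_neg hcond]
        rw [if_neg (by intro h; exact hcond ⟨h.2.2.1, h.2.2.2⟩)]
    · have hget : PySem.List.pyGetD cs' k 0 = PySem.List.pyGetD cs k 0 := by
        rw [hcs']; split
        · rw [hset, if_neg hka]
        · rfl
      rw [hget]
      congr 1
      have : (a + 1 ≤ k ∧ k < b ∧ ¬ k ∈ ccs ∧ PySem.List.pyGetD row k 1 = 0) ↔
             (a ≤ k ∧ k < b ∧ ¬ k ∈ ccs ∧ PySem.List.pyGetD row k 1 = 0) := by
        constructor
        · rintro ⟨h1, h2⟩; exact ⟨by omega, h2⟩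
        · rintro ⟨h1, h2⟩; exact ⟨by omega, h2⟩
      simp only [this]

-- the row-major tally fold, read at an uncovered column k, equals A's column count fold
theorem pv_rows_get (mat : List (List Int)) (rcs ccs : List Int) (n : Int)
    (rs : List Int) (cs : List Int) (k : Int)
    (hn : n ≤ (cs.length : Int)) (hk0 : 0 ≤ k) (hkn : k < n) (hkc : ¬ k ∈ ccs) :
    PySem.List.pyGetD
      (rs.foldl (fun cs r => if r ∈ rcs then cs else bBump ccs (PySem.List.pyGetD mat r []) n cs) cs) k 0
    = rs.foldl
        (fun acc r =>
          if (¬ r ∈ rcs) ∧ PySem.List.pyGetD (PySem.List.pyGetD mat r []) k 1 = 0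
          then acc + 1 else acc) (PySem.List.pyGetD cs k 0) := by
  induction rs generalizing cs with
  | nil => rfl
  | cons r rs ih =>
    simp only [List.foldl_cons]
    by_cases hr : r ∈ rcs
    · rw [if_pos hr, if_neg (by intro h; exact h.1 hr), ih cs hn]
    · rw [if_neg hr]
      rw [ih (bBump ccs (PySem.List.pyGetD mat r []) n cs) (by rw [pv_bBump_len]; exact hn)]
      have hbump : PySem.List.pyGetD (bBump ccs (PySem.List.pyGetD mat r []) n cs) k 0 =
          PySem.List.pyGetD cs k 0 +
            (if (0 : Int) ≤ k ∧ k < n ∧ ¬ k ∈ ccs ∧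
                PySem.List.pyGetD (PySem.List.pyGetD mat r []) k 1 = 0 then 1 else 0) := by
        unfold bBump
        exact pv_bump_get ccs (PySem.List.pyGetD mat r []) 0 n cs k (le_refl 0) hn hk0 (by omega)
      rw [hbump]
      by_cases hz : PySem.List.pyGetD (PySem.List.pyGetD mat r []) k 1 = 0
      · rw [if_pos ⟨hk0, hkn, hkc, hz⟩, if_pos ⟨hr, hz⟩]
      · rw [if_neg (by intro h; exact hz h.2.2.2), if_neg (by intro h; exact hz h.2)]
        simp


-- a covered column's count cell is never touched by the tally fold
theorem pv_rows_covered (mat : List (List Int)) (rcs ccs : List Int) (n : Int)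
    (rs : List Int) (cs : List Int) (k : Int)
    (hn : n ≤ (cs.length : Int)) (hk0 : 0 ≤ k) (hkn : k < n) (hkc : k ∈ ccs) :
    PySem.List.pyGetD
      (rs.foldl (fun cs r => if r ∈ rcs then cs else bBump ccs (PySem.List.pyGetD mat r []) n cs) cs) k 0
    = PySem.List.pyGetD cs k 0 := by
  induction rs generalizing cs with
  | nil => rfl
  | cons r rs ih =>
    simp only [List.foldl_cons]
    by_cases hr : r ∈ rcs
    · rw [if_pos hr, ih cs hn]
    · rw [if_neg hr, ih _ (by rw [pv_bBump_len]; exact hn)]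
      have hbump := pv_bump_get ccs (PySem.List.pyGetD mat r []) 0 n cs k (le_refl 0) hn hk0 (by omega)
      unfold bBump
      rw [hbump, if_neg (by intro h; exact h.2.2.1 hkc)]
      simp

theorem pv_init_zero (m : Nat) (k : Int) (hk0 : 0 ≤ k) :
    PySem.List.pyGetD (List.replicate m (0 : Int)) k 0 = 0 := by
  rw [PySem.List.pyGetD_of_nonneg _ _ hk0]
  by_cases h : k.toNat < m
  · rw [List.getD_eq_getElem _ _ (by simpa using h)]
    simp
  · rw [List.getD_eq_default _ _ (by simpa using h)]

-- membership in Set.ofList does not change A's column count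
theorem pv_aColCount_ofList (mat : List (List Int)) (rc : List Int) (n c : Int) :
    aColCount mat (PySem.Set.ofList rc) n c = aColCount mat rc n c := by
  unfold aColCount
  congr 1
  funext acc r
  simp [PySem.Set.mem_ofList]

-- B's counts table read at an uncovered in-range column is A's column count
theorem pv_counts_uncovered (mat : List (List Int)) (rcs ccs : List Int) (k : Int)
    (hk0 : 0 ≤ k) (hkn : k < (mat.length : Int)) (hkc : ¬ k ∈ ccs) :
    PySem.List.pyGetD (bCounts mat rcs ccs (mat.length : Int)) k 0 =
    aColCount mat rcs (mat.length : Int) k := by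
  unfold bCounts aColCount
  rw [pv_rows_get mat rcs ccs (mat.length : Int) _ _ k (by simp) hk0 hkn hkc,
    pv_init_zero mat.length k hk0]

-- B's counts table reads 0 at a covered in-range column
theorem pv_counts_covered (mat : List (List Int)) (rcs ccs : List Int) (k : Int)
    (hk0 : 0 ≤ k) (hkn : k < (mat.length : Int)) (hkc : k ∈ ccs) :
    PySem.List.pyGetD (bCounts mat rcs ccs (mat.length : Int)) k 0 = 0 := by
  unfold bCounts
  rw [pv_rows_covered mat rcs ccs (mat.length : Int) _ _ k (by simp) hk0 hkn hkc,
    pv_init_zero mat.length k hk0]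

-- the two argmax folds agree as long as the running maximum stays nonnegative
theorem pv_argmax (mat : List (List Int)) (row_covers col_covers : List Int) (n : Int)
    (counts : List Int)
    (hcov : ∀ c : Int, 0 ≤ c → c < n → c ∈ col_covers → PySem.List.pyGetD counts c 0 = 0)
    (hunc : ∀ c : Int, 0 ≤ c → c < n → ¬ c ∈ col_covers →
      PySem.List.pyGetD counts c 0 = aColCount mat row_covers n c) :
    ∀ (cols : List Int), (∀ c ∈ cols, 0 ≤ c ∧ c < n) → ∀ st : Int × Int, 0 ≤ st.1 →
      cols.foldl (aStep mat row_covers col_covers n) st =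
      cols.foldl
        (fun st c =>
          if PySem.List.pyGetD counts c 0 > st.1 then (PySem.List.pyGetD counts c 0, c) else st) st := by
  intro cols
  induction cols with
  | nil => intro _ st _; rfl
  | cons c cols ih =>
    intro hmem st hst
    have hc := hmem c (List.mem_cons_self ..)
    simp only [List.foldl_cons]
    by_cases hcc : c ∈ col_covers
    · rw [show aStep mat row_covers col_covers n st c = st by unfold aStep; rw [if_pos hcc]]
      rw [hcov c hc.1 hc.2 hcc, if_neg (by omega)]
      exact ih (fun x hx => hmem x (List.mem_cons_of_mem _ hx)) st hst
    · rw [hunc c hc.1 hc.2 hcc]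
      unfold aStep
      rw [if_neg hcc]
      by_cases hgt : aColCount mat row_covers n c > st.1
      · rw [if_pos hgt]
        exact ih (fun x hx => hmem x (List.mem_cons_of_mem _ hx)) _ (by simp; omega)
      · rw [if_neg hgt]
        exact ih (fun x hx => hmem x (List.mem_cons_of_mem _ hx)) st hst

-- ===== VERDICT (by name: the statement is the Claim_ definition above) =====
theorem get_max_cols_spec : Claim_equal_get_max_cols := by
  intro mat rc cc _hdom _hpre
  unfold Spec_get_max_cols get_max_cols get_max_cols_alt
  have hfold :
      (PySem.List.pyRange 0 (mat.length : Int) 1).foldl (aStep mat rc cc (mat.length : Int)) (0, -1) =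
      (PySem.List.pyRange 0 (mat.length : Int) 1).foldl
        (fun st c =>
          if PySem.List.pyGetD (bCounts mat (PySem.Set.ofList rc) (PySem.Set.ofList cc) (mat.length : Int)) c 0 > st.1
          then (PySem.List.pyGetD (bCounts mat (PySem.Set.ofList rc) (PySem.Set.ofList cc) (mat.length : Int)) c 0, c)
          else st) (0, -1) := by
    apply pv_argmax
    · intro c h0 h1 hcc
      exact pv_counts_covered mat _ _ c h0 h1 ((PySem.Set.mem_ofList cc c).mpr hcc)
    · intro c h0 h1 hcc
      rw [pv_counts_uncovered mat _ _ c h0 h1 (fun h => hcc ((PySem.Set.mem_ofList cc c).mp h)),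
        pv_aColCount_ofList]
    · intro c hcmem
      have := (PySem.List.mem_pyRange_one).mp hcmem
      exact ⟨this.1, this.2⟩
    · simp
  dsimp only
  rw [hfold]
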